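-- pv_equiv track=rewrite | github.com/backbay-labs/reverend | scripts/ml/corpus_sync_worker.py | _capability_granted
-- ===== SOURCE A (Python) =====
-- def _normalize_capability(value: str) -> str:
--     return value.strip().upper()
--
-- def _capability_granted(granted_capabilities: frozenset[str], required_capability: str) -> bool:
--     required = _normalize_capability(required_capability)
--     for granted_raw in granted_capabilities:
--         granted = _normalize_capability(granted_raw)
--         if not granted:
--             continue
--         if granted in {"*", "ADMIN"}:
--             return True
--         if granted == required:
--             return True
--         if granted.endswith(".*"):
--             prefix = granted[:-1]
--             if required.startswith(prefix):
--                 return True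
--     return False
-- ===== SOURCE B (Python) =====
-- def _normalize_capability(value: str) -> str:
--     return value.strip().upper()
--
-- def _capability_granted(granted_capabilities, required_capability):
--     # Derive from the REQUIRED capability the complete set of grant strings that
--     # could grant it, then test each normalized grant for membership in that set.
--     required = _normalize_capability(required_capability)
--     keys = {"*", "ADMIN"}
--     if required:
--         keys.add(required)
--     for i, ch in enumerate(required):
--         if ch == ".":
--             keys.add(required[: i + 1] + "*")
--     return any(_normalize_capability(g) in keys for g in granted_capabilities)
-- ===== Notes on version B (the rewrite author's own statement) =====
-- stated objective: alternative
-- what changed: Inverts the matching direction: instead of scanning grants and testing each against the required capability with ordered branches, B derives from the required capability the complete finite set of grant strings that could grant it ('*', 'ADMIN', the capability itself, and one wildcard pattern per dot inside it) and then answers with a single membership test per grant.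
import Mathlib
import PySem

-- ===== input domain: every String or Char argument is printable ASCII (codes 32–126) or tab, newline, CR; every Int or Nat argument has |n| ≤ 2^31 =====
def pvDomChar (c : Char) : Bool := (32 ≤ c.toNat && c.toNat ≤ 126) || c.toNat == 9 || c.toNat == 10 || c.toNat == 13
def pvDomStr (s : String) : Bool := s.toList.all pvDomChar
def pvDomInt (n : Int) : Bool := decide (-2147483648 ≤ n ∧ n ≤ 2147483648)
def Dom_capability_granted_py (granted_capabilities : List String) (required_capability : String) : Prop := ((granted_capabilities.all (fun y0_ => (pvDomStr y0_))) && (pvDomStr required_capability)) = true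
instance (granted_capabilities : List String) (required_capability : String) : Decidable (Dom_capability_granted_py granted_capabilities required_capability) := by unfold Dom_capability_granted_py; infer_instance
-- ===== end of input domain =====

-- B inverts the matching direction: it derives from the required capability the finite set of
-- grant strings that could grant it, then answers with one membership test per grant (alternative).

-- ===== PORT A =====
-- _normalize_capability (A's copy)
def pvNormA (value : String) : String := PySem.Str.upper (PySem.Str.strip value)

-- the for-loop of A, with its early returns, as structural recursion
def capGrantedLoopA (required : String) : List String → Bool
  | [] => false
  | granted_raw :: rest =>
    let granted := pvNormA granted_raw
    if granted = "" then capGrantedLoopA required rest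
    else if granted = "*" ∨ granted = "ADMIN" then true
    else if granted = required then true
    else if PySem.Str.endswith granted ".*" &&
            PySem.Str.startswith required (PySem.Str.slice granted none (some (-1))) then true
    else capGrantedLoopA required rest

def capability_granted_py (granted_capabilities : List String) (required_capability : String) : Bool :=
  capGrantedLoopA (pvNormA required_capability) granted_capabilities

-- ===== PORT B =====
-- _normalize_capability (B's copy)
def pvNormB (value : String) : String := PySem.Str.upper (PySem.Str.strip value)

-- required[: i + 1] + "*"  (string concatenation modelled on code points — exact)
def pvWildKey (required : String) (i : Int) : String :=
  String.ofList ((PySem.Str.slice required none (some (i + 1))).toList ++ ['*'])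

-- the 'for i, ch in enumerate(required)' loop of B
def pvKeysLoop (required : String) (s : PySem.Set String) (l : List (Int × Char)) : PySem.Set String :=
  l.foldl (fun ks p => if p.2 = '.' then PySem.Set.add ks (pvWildKey required p.1) else ks) s

def capability_granted_py_alt (granted_capabilities : List String) (required_capability : String) : Bool :=
  let required := pvNormB required_capability
  let keys0 : PySem.Set String := PySem.Set.ofList ["*", "ADMIN"]
  let keys1 := if required ≠ "" then PySem.Set.add keys0 required else keys0
  let keys := pvKeysLoop required keys1 (PySem.List.enumerate required.toList 0)
  granted_capabilities.any (fun g => PySem.Set.contains keys (pvNormB g))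

-- ===== PRECONDITION & SPEC =====
def Spec_capability_granted_py (granted_capabilities : List String) (required_capability : String) (out : Bool) : Prop := out = capability_granted_py_alt granted_capabilities required_capability
instance (granted_capabilities : List String) (required_capability : String) (out : Bool) : Decidable (Spec_capability_granted_py granted_capabilities required_capability out) := by unfold Spec_capability_granted_py; infer_instance

-- ===== CLAIM (what is proved, stated in full; the proofs are below) =====
def Claim_equal_capability_granted_py : Prop := ∀ (granted_capabilities : List String) (required_capability : String), Dom_capability_granted_py granted_capabilities required_capability → Spec_capability_granted_py granted_capabilities required_capability (capability_granted_py granted_capabilities required_capability)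

-- ===== LEMMAS AND PROOFS =====

-- the match predicate A decides for one normalized capability c
def pvMatch (required c : String) : Prop :=
  c ≠ "" ∧ (c = "*" ∨ c = "ADMIN" ∨ c = required ∨
    (PySem.Str.endswith c ".*" &&
      PySem.Str.startswith required (PySem.Str.slice c none (some (-1)))) = true)

lemma pvNormB_eq_pvNormA : pvNormB = pvNormA := rfl

lemma loopA_eq_true_iff (required : String) (l : List String) :
    capGrantedLoopA required l = true ↔ ∃ g ∈ l, pvMatch required (pvNormA g) := by
  induction l with
  | nil => simp [capGrantedLoopA]
  | cons g rest ih =>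
    simp only [capGrantedLoopA]
    by_cases h0 : pvNormA g = ""
    · simp [h0, ih, pvMatch]
    · split_ifs with h1 h2 h3
      · constructor
        · intro _
          refine ⟨g, by simp, h0, ?_⟩
          rcases h1 with h | h
          · exact Or.inl h
          · exact Or.inr (Or.inl h)
        · intro _; rfl
      · exact ⟨fun _ => ⟨g, by simp, h0, Or.inr (Or.inr (Or.inl h2))⟩, fun _ => rfl⟩
      · exact ⟨fun _ => ⟨g, by simp, h0, Or.inr (Or.inr (Or.inr h3))⟩, fun _ => rfl⟩
      · rw [ih]
        constructor
        · rintro ⟨x, hx, hm⟩; exact ⟨x, by simp [hx], hm⟩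
        · rintro ⟨x, hx, hm⟩
          rcases List.mem_cons.mp hx with rfl | hx'
          · rcases hm.2 with h | h | h | h
            · exact absurd (Or.inl h) h1
            · exact absurd (Or.inr h) h1
            · exact absurd h h2
            · exact absurd h h3
          · exact ⟨x, hx', hm⟩

lemma wildKey_toList (req : String) (n : Nat) :
    (pvWildKey req (n : Int)).toList = req.toList.take (n + 1) ++ ['*'] := by
  have hc : ((n : Int) + 1) = ((n + 1 : Nat) : Int) := by push_cast; ring
  have hsl : (PySem.Str.slice req none (some ((n : Int) + 1))).toList
      = req.toList.take (n + 1) := by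
    rw [hc, PySem.Str.toList_slice, PySem.Chars.slice_eq_listSlice,
        PySem.List.slice_to_natCast]
  unfold pvWildKey
  rw [String.toList_ofList, hsl]

lemma wildKey_ne_empty (req : String) (n : Nat) : pvWildKey req (n : Int) ≠ "" := by
  intro h
  have := wildKey_toList req n
  rw [h] at this
  simp at this

-- membership in B's enumerate-fold
lemma keysLoop_cons (req : String) (s : PySem.Set String) (off : Int) (c : Char)
    (l : List (Int × Char)) :
    pvKeysLoop req s ((off, c) :: l) =
      pvKeysLoop req (if c = '.' then PySem.Set.add s (pvWildKey req off) else s) l := rfl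

lemma keysLoop_mem (req : String) (rs : List Char) :
    ∀ (off : Int) (s : PySem.Set String) (x : String),
      x ∈ pvKeysLoop req s (PySem.List.enumerate rs off) ↔
        x ∈ s ∨ ∃ i : Nat, i < rs.length ∧ rs[i]? = some '.' ∧ x = pvWildKey req (off + (i : Int)) := by
  induction rs with
  | nil => simp [pvKeysLoop, PySem.List.enumerate_nil]
  | cons c rest ih =>
    intro off s x
    rw [PySem.List.enumerate_cons, keysLoop_cons]
    by_cases hc : c = '.'
    · rw [if_pos hc, ih, PySem.Set.mem_add]
      constructor
      · rintro ((hs | hx) | ⟨i, hi, hdot, hx⟩)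
        · exact Or.inl hs
        · exact Or.inr ⟨0, by simp, by simp [hc], by simpa using hx⟩
        · refine Or.inr ⟨i + 1, by simpa using hi, by simpa using hdot, ?_⟩
          rw [hx]; congr 1; push_cast; ring
      · rintro (hs | ⟨i, hi, hdot, hx⟩)
        · exact Or.inl (Or.inl hs)
        · cases i with
          | zero => exact Or.inl (Or.inr (by simpa using hx))
          | succ j =>
            refine Or.inr ⟨j, by simpa using hi, by simpa using hdot, ?_⟩
            rw [hx]; congr 1; push_cast; ring
    · rw [if_neg hc, ih]
      constructor
      · rintro (hs | ⟨i, hi, hdot, hx⟩)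
        · exact Or.inl hs
        · refine Or.inr ⟨i + 1, by simpa using hi, by simpa using hdot, ?_⟩
          rw [hx]; congr 1; push_cast; ring
      · rintro (hs | ⟨i, hi, hdot, hx⟩)
        · exact Or.inl hs
        · cases i with
          | zero =>
            exfalso; apply hc
            simpa using hdot
          | succ j =>
            refine Or.inr ⟨j, by simpa using hi, by simpa using hdot, ?_⟩
            rw [hx]; congr 1; push_cast; ring

-- A's wildcard branch ⟺ c is one of B's wildcard keys for req
lemma wild_iff (req c : String) :
    (PySem.Str.endswith c ".*" &&
      PySem.Str.startswith req (PySem.Str.slice c none (some (-1)))) = true ↔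
    ∃ i : Nat, i < req.toList.length ∧ req.toList[i]? = some '.' ∧ c = pvWildKey req (i : Int) := by
  constructor
  · intro h
    rw [Bool.and_eq_true] at h
    obtain ⟨h1, h2⟩ := h
    rw [PySem.Str.endswith_eq, PySem.Chars.endswith_iff] at h1
    have hdotstar : (".*" : String).toList = ['.', '*'] := by decide
    rw [hdotstar] at h1
    obtain ⟨p, hp⟩ := h1
    rw [PySem.Str.startswith_eq, PySem.Chars.startswith_iff,
        PySem.Str.slice_to_neg_one c] at h2
    have hdl : c.toList.dropLast = p ++ ['.'] := by
      rw [← hp]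
      show (p ++ ['.', '*']).dropLast = p ++ ['.']
      rw [show p ++ ['.', '*'] = (p ++ ['.']) ++ ['*'] by simp]
      simp
    rw [hdl] at h2
    have hlen : p.length + 1 ≤ req.toList.length := by
      have := h2.length_le; simpa using this
    have htake : p ++ ['.'] = req.toList.take (p.length + 1) := by
      have := List.prefix_iff_eq_take.mp h2; simpa using this
    refine ⟨p.length, by omega, ?_, ?_⟩
    · have : (req.toList.take (p.length + 1))[p.length]? = some '.' := by
        rw [← htake]
        rw [List.getElem?_append_right (by omega)]
        simp
      rwa [List.getElem?_take_of_lt (by omega)] at this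
    · apply String.toList_inj.mp
      rw [wildKey_toList, ← htake, ← hp]
      simp
  · rintro ⟨i, hi, hdot, rfl⟩
    have hdotE : req.toList[i]? = some '.' := hdot
    have htake : req.toList.take (i + 1) = req.toList.take i ++ ['.'] := by
      rw [List.take_add_one, hdotE]; rfl
    rw [Bool.and_eq_true]
    constructor
    · rw [PySem.Str.endswith_eq, PySem.Chars.endswith_iff]
      have hdotstar : (".*" : String).toList = ['.', '*'] := by decide
      rw [hdotstar, wildKey_toList, htake]
      exact ⟨req.toList.take i, by simp⟩
    · rw [PySem.Str.startswith_eq, PySem.Chars.startswith_iff,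
          PySem.Str.slice_to_neg_one, wildKey_toList]
      rw [show req.toList.take (i + 1) ++ ['*'] = (req.toList.take (i + 1)) ++ ['*'] from rfl]
      simp only [List.dropLast_concat]
      exact List.take_prefix _ _

-- A's whole match predicate ⟺ membership in B's key set
lemma match_iff_mem_keys (req c : String) :
    pvMatch req c ↔
      c ∈ pvKeysLoop req
            (if req ≠ "" then PySem.Set.add (PySem.Set.ofList ["*", "ADMIN"]) req
             else PySem.Set.ofList ["*", "ADMIN"])
            (PySem.List.enumerate req.toList 0) := by
  rw [keysLoop_mem]
  have hbase : ∀ x : String,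
      (x ∈ (if req ≠ "" then PySem.Set.add (PySem.Set.ofList ["*", "ADMIN"]) req
            else PySem.Set.ofList ["*", "ADMIN"])) ↔
      (x = "*" ∨ x = "ADMIN" ∨ (req ≠ "" ∧ x = req)) := by
    intro x
    by_cases hreq : req = ""
    · simp [hreq, PySem.Set.mem_ofList]
    · simp only [if_pos hreq, PySem.Set.mem_add, PySem.Set.mem_ofList]
      simp [hreq]; tauto
  constructor
  · rintro ⟨hne, h | h | h | h⟩
    · exact Or.inl ((hbase c).mpr (Or.inl h))
    · exact Or.inl ((hbase c).mpr (Or.inr (Or.inl h)))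
    · exact Or.inl ((hbase c).mpr (Or.inr (Or.inr ⟨h ▸ hne, h⟩)))
    · obtain ⟨i, hi, hdot, hc⟩ := (wild_iff req c).mp h
      exact Or.inr ⟨i, hi, hdot, by simpa using hc⟩
  · rintro (hb | ⟨i, hi, hdot, hc⟩)
    · rcases (hbase c).mp hb with h | h | ⟨hreq, h⟩
      · exact ⟨by simp [h], Or.inl h⟩
      · exact ⟨by simp [h], Or.inr (Or.inl h)⟩
      · exact ⟨h ▸ hreq, Or.inr (Or.inr (Or.inl h))⟩
    · have hc' : c = pvWildKey req (i : Int) := by simpa using hc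
      refine ⟨hc' ▸ wildKey_ne_empty req i, Or.inr (Or.inr (Or.inr ?_))⟩
      exact (wild_iff req c).mpr ⟨i, hi, hdot, hc'⟩

lemma altB_eq_true_iff (gcs : List String) (rc : String) :
    capability_granted_py_alt gcs rc = true ↔
      ∃ g ∈ gcs, pvMatch (pvNormB rc) (pvNormB g) := by
  unfold capability_granted_py_alt
  simp only [List.any_eq_true, PySem.Set.contains_eq_listContains, List.contains_iff_mem]
  constructor
  · rintro ⟨g, hg, hm⟩
    exact ⟨g, hg, (match_iff_mem_keys (pvNormB rc) (pvNormB g)).mpr hm⟩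
  · rintro ⟨g, hg, hm⟩
    exact ⟨g, hg, (match_iff_mem_keys (pvNormB rc) (pvNormB g)).mp hm⟩

-- ===== VERDICT (by name: the statement is the Claim_ definition above) =====
theorem capability_granted_py_spec : Claim_equal_capability_granted_py := by
  intro gcs rc _
  unfold Spec_capability_granted_py
  rw [Bool.eq_iff_iff]
  unfold capability_granted_py
  rw [loopA_eq_true_iff, altB_eq_true_iff, pvNormB_eq_pvNormA]
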